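-- pv_equiv track=rewrite | github.com/ohdnf/algo-study | programmers/2021_kakao_blind_recruit/메뉴리뉴얼/메뉴리뉴얼_박선환.py | solution
-- ===== SOURCE A (Python) =====
-- def solution(orders, course):
--     from collections import defaultdict
--     from itertools import combinations
--
--     for i in range(len(orders)):
--         orders[i] = sorted(orders[i])
--
--     answer = []
--     dict = defaultdict()
--     course_num_dict = defaultdict()
--
--     for order in orders:
--         for num in course:
--             combis = list(combinations(list(order), num))
--             if combis:
--                 for combi in combis:
--                     try:
--                         dict[''.join(combi)] += 1
--                     except:
--                         dict[''.join(combi)] = 1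
--
--     for combi in dict:
--         try:
--             if course_num_dict[len(combi)] < dict[combi]:
--                 course_num_dict[len(combi)] = dict[combi]
--         except:
--             course_num_dict[len(combi)] = dict[combi]
--
--     for combi in dict:
--         if course_num_dict[len(combi)] >= 2 and dict[combi] == course_num_dict[len(combi)]:
--             answer.append(combi)
--     return sorted(answer)
-- ===== SOURCE B (Python) =====
-- def solution(orders, course):
--     for i in range(len(orders)):
--         orders[i] = sorted(orders[i])
--
--     def _gen(order, need):
--         # all length-`need` combinations of `order` (kept in order), recursively
--         if need == 0:
--             return [[]]
--         if len(order) < need: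
--             return []
--         first, rest = order[0], order[1:]
--         return [[first] + t for t in _gen(rest, need - 1)] + _gen(rest, need)
--
--     pool = []
--     for order in orders:
--         for num in course:
--             pool.extend(''.join(c) for c in _gen(order, num))
--
--     # sort the pool and count by scanning runs of equal strings
--     pool.sort()
--     runs = []
--     i = 0
--     while i < len(pool):
--         j = i
--         while j < len(pool) and pool[j] == pool[i]:
--             j += 1
--         runs.append((pool[i], j - i))
--         i = j
--
--     maxlen = 0
--     for k, _ in runs:
--         if maxlen < len(k):
--             maxlen = len(k)
--     best = [0] * (maxlen + 1)
--     for k, c in runs: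
--         if best[len(k)] < c:
--             best[len(k)] = c
--
--     # runs are in sorted key order, so the answer is already sorted
--     return [k for k, c in runs if c >= 2 and c == best[len(k)]]
-- ===== Notes on version B (the rewrite author's own statement) =====
-- stated objective: alternative
-- what changed: A counts every generated combination in a global hash dict (via itertools.combinations and try/except increments) and then makes two more dict passes for per-length maxima and the filter; B uses no counting dict at all: it generates combinations by structural recursion, collects them all in one flat list, sorts it and counts by run-length scanning the sorted list, keeps per-length maxima in a plain array, and emits the answer already in sorted order with no final sort; both mutate orders in place by sorting each order (same side effect), and the equivalence proved is about the return value.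
-- outside the precondition, e.g. on solution(['ab'], [-1]): A raises ValueError, B raises IndexError
import Mathlib
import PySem

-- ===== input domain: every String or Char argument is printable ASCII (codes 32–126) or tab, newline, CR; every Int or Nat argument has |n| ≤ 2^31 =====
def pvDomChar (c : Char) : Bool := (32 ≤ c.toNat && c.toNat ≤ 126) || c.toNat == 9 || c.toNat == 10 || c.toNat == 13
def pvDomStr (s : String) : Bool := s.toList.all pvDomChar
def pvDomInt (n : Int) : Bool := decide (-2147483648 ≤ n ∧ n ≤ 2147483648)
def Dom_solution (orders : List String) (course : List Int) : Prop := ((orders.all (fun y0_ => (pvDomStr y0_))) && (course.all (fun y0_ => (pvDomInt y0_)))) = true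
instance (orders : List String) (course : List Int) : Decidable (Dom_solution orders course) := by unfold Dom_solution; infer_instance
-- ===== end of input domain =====

-- B replaces A's global counting dict entirely: it generates combinations by structural recursion
-- (no itertools), sorts the flat pool and counts by run-length scanning, keeps per-length maxima in
-- a plain array, and emits the answer already in sorted order; same in-place sort of each order
-- (same side effect); the equivalence proved is about the return value.


-- ===== PORT A =====
def solution (orders : List String) (course : List Int) : List String :=
  let orders2 := orders.map (fun s => PySem.List.sorted s.toList (fun c => c) false)
  let dict := orders2.foldl (fun d order =>
    course.foldl (fun d num =>
      let combis := PySem.List.combinations order num.toNat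
      if combis.isEmpty then d
      else combis.foldl (fun (d : PySem.Dict String Int) combi =>
        let k : String := String.ofList combi
        match d.get? k with            -- try: d[k] += 1 / except: d[k] = 1
        | some v => d.insert k (v + 1)
        | none => d.insert k 1) d) d) PySem.Dict.empty
  let cnd := dict.keys.foldl (fun (cd : PySem.Dict Int Int) combi =>
    match cd.get? (PySem.Str.len combi) with
    | some v => if v < dict.getD combi 0 then cd.insert (PySem.Str.len combi) (dict.getD combi 0) else cd
    | none => cd.insert (PySem.Str.len combi) (dict.getD combi 0)) PySem.Dict.empty
  let answer := dict.keys.foldl (fun ans combi =>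
    if cnd.getD (PySem.Str.len combi) 0 ≥ 2 ∧ dict.getD combi 0 = cnd.getD (PySem.Str.len combi) 0
    then ans ++ [combi] else ans) []
  PySem.List.sorted answer (fun x => x) false

-- ===== PORT B =====
-- recursive _gen of Source B; the [] case under need ≠ 0, ¬(len < need) is Python's IndexError on
-- order[0] (reachable only for need < 0, excluded by Pre_)
def genB (order : List Char) (need : Int) : List (List Char) :=
  if need = 0 then [[]]
  else if (order.length : Int) < need then []
  else match order with
    | [] => []
    | f :: rest => (genB rest (need - 1)).map (f :: ·) ++ genB rest need
termination_by order.length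
decreasing_by all_goals simp

-- the two nested while loops of Source B: split off the run of strings equal to the head
def runsB (l : List String) : List (String × Int) :=
  match l with
  | [] => []
  | x :: xs => (x, 1 + ((xs.takeWhile (· == x)).length : Int)) :: runsB (xs.dropWhile (· == x))
termination_by l.length
decreasing_by simpa using Nat.lt_succ_of_le (List.length_dropWhile_le _ _)

def solution_alt (orders : List String) (course : List Int) : List String :=
  let orders2 := orders.map (fun s => PySem.List.sorted s.toList (fun c => c) false)
  let pool := orders2.foldl (fun pool order =>
    course.foldl (fun pool num =>
      pool ++ (genB order num).map (fun c => String.ofList c)) pool) []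
  let pool2 := PySem.List.sorted pool (fun x => x) false
  let runs := runsB pool2
  let maxlen := runs.foldl (fun m p => if m < PySem.Str.len p.1 then PySem.Str.len p.1 else m) 0
  -- best[len(k)]: index always in range since maxlen bounds every key length, so getD is exact
  let best : List Int := runs.foldl (fun (best : List Int) p =>
    if best.getD (PySem.Str.len p.1).toNat 0 < p.2
    then best.set (PySem.Str.len p.1).toNat p.2 else best)
    (List.replicate (maxlen + 1).toNat (0 : Int))
  (runs.filter (fun p => (2 ≤ p.2 && p.2 == best.getD (PySem.Str.len p.1).toNat 0))).map (·.1)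

-- ===== PRECONDITION & SPEC =====
-- Pre_ excludes exactly the inputs where A raises: with at least one order present,
-- itertools.combinations raises ValueError on a negative course size (with no orders the loops
-- never run and A returns []).
def Pre_solution (orders : List String) (course : List Int) : Prop :=
  orders = [] ∨ ∀ num ∈ course, 0 ≤ num
instance (orders : List String) (course : List Int) : Decidable (Pre_solution orders course) := by unfold Pre_solution; infer_instance
def pvWitness_solution : List String × List Int := (["abc", "acb"], [2])
def Spec_solution (orders : List String) (course : List Int) (out : List String) : Prop := out = solution_alt orders course
instance (orders : List String) (course : List Int) (out : List String) : Decidable (Spec_solution orders course out) := by unfold Spec_solution; infer_instance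

-- ===== CLAIM (what is proved, stated in full; the proofs are below) =====
def Claim_equal_solution : Prop := ∀ (orders : List String) (course : List Int), Dom_solution orders course → Pre_solution orders course → Spec_solution orders course (solution orders course)

-- ===== LEMMAS AND PROOFS =====

-- the stream of generated combination strings (A's and B's common data)
def pvCombos (order : List Char) (num : Int) : List String :=
  (PySem.List.combinations order num.toNat).map (fun c => String.ofList c)

def pvGen (O : List (List Char)) (course : List Int) : List String :=
  O.flatMap (fun order => course.flatMap (fun num => pvCombos order num))

def pvO (orders : List String) : List (List Char) :=
  orders.map (fun s => PySem.List.sorted s.toList (fun c => c) false)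

def pvOmax (o : Option Int) (v : Int) : Option Int :=
  some (match o with | none => v | some m => max m v)

def pvC (gen : List String) : PySem.Dict Int Int :=
  (PySem.Set.ofList gen : List String).foldl (fun (cd : PySem.Dict Int Int) combi =>
    match cd.get? (PySem.Str.len combi) with
    | some v => if v < (PySem.Dict.counter gen).getD combi 0
                then cd.insert (PySem.Str.len combi) ((PySem.Dict.counter gen).getD combi 0) else cd
    | none => cd.insert (PySem.Str.len combi) ((PySem.Dict.counter gen).getD combi 0)) PySem.Dict.empty

def pvPA (gen : List String) (k : String) : Prop :=
  k ∈ gen ∧ 2 ≤ ((gen.count k : Int)) ∧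
  ∀ k' ∈ gen, PySem.Str.len k' = PySem.Str.len k → ((gen.count k' : Int)) ≤ ((gen.count k : Int))

-- ===== A side =====
lemma pv_dictA_eq (O : List (List Char)) (course : List Int) :
    O.foldl (fun d order =>
      course.foldl (fun d num =>
        if (PySem.List.combinations order num.toNat).isEmpty then d
        else (PySem.List.combinations order num.toNat).foldl (fun (d : PySem.Dict String Int) combi =>
          match d.get? (String.ofList combi) with
          | some v => d.insert (String.ofList combi) (v + 1)
          | none => d.insert (String.ofList combi) 1) d) d) PySem.Dict.empty
    = PySem.Dict.counter (pvGen O course) := by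
  have h1 : ∀ (d : PySem.Dict String Int) (combi : List Char),
      (match d.get? (String.ofList combi) with
       | some v => d.insert (String.ofList combi) (v + 1)
       | none => d.insert (String.ofList combi) 1)
      = d.insert (String.ofList combi) (d.getD (String.ofList combi) 0 + 1) := by
    intro d combi
    cases h : d.get? (String.ofList combi) <;>
      simp [PySem.Dict.getD_eq_get?_getD, h]
  have h2 : O.foldl (fun d order =>
      course.foldl (fun d num =>
        if (PySem.List.combinations order num.toNat).isEmpty then d
        else (PySem.List.combinations order num.toNat).foldl (fun (d : PySem.Dict String Int) combi =>
          match d.get? (String.ofList combi) with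
          | some v => d.insert (String.ofList combi) (v + 1)
          | none => d.insert (String.ofList combi) 1) d) d) PySem.Dict.empty
      = O.foldl (fun d order =>
          course.foldl (fun d num =>
            (pvCombos order num).foldl (fun (d : PySem.Dict String Int) k =>
              d.insert k (d.getD k 0 + 1)) d) d) PySem.Dict.empty := by
    apply PySem.List.foldl_congr_mem
    intro d order _
    apply PySem.List.foldl_congr_mem
    intro d num _
    by_cases hemp : (PySem.List.combinations order num.toNat).isEmpty
    · have he : PySem.List.combinations order num.toNat = [] := List.isEmpty_iff.mp hemp
      simp [he, pvCombos]
    · simp only [hemp, pvCombos, List.foldl_map]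
      apply PySem.List.foldl_congr_mem
      intro d c _
      exact h1 d c
  rw [h2, pvGen, ← PySem.Dict.foldl_insert_getD_add_one_eq_counter]
  simp only [List.foldl_flatMap]

lemma pv_omax_fold_some (L : List Int) (a : Int) :
    L.foldl pvOmax (some a) = some (L.foldl max a) := by
  induction L generalizing a with
  | nil => rfl
  | cons x t ih => simp [List.foldl_cons, pvOmax, ih]

lemma pv_omax_fold_none (L : List Int) :
    L.foldl pvOmax none = PySem.List.max? L (fun v => v) := by
  cases L with
  | nil => rfl
  | cons x t => simp [List.foldl_cons, pvOmax, pv_omax_fold_some, PySem.List.max?_id_cons]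

lemma pv_cnd_get? (K : List String) (f : String → Int) (cd : PySem.Dict Int Int) (s : Int) :
    (K.foldl (fun (cd : PySem.Dict Int Int) k =>
      match cd.get? (PySem.Str.len k) with
      | some v => if v < f k then cd.insert (PySem.Str.len k) (f k) else cd
      | none => cd.insert (PySem.Str.len k) (f k)) cd).get? s
    = ((K.filter (fun k => PySem.Str.len k == s)).map f).foldl pvOmax (cd.get? s) := by
  induction K generalizing cd with
  | nil => rfl
  | cons k K ih =>
    have hstep : ((match cd.get? (PySem.Str.len k) with
      | some v => if v < f k then cd.insert (PySem.Str.len k) (f k) else cd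
      | none => cd.insert (PySem.Str.len k) (f k)) : PySem.Dict Int Int).get? s
        = if PySem.Str.len k = s then pvOmax (cd.get? s) (f k) else cd.get? s := by
      by_cases hs : PySem.Str.len k = s
      · subst hs
        cases h : cd.get? (PySem.Str.len k) with
        | none => simp only [PySem.Dict.get?_insert, h, pvOmax]
        | some v =>
          by_cases hv : v < f k
          · simp only [h, if_pos hv, PySem.Dict.get?_insert, pvOmax, if_true]
            congr 2
            omega
          · simp only [h, if_neg hv, pvOmax, if_true]
            congr 2
            omega
      · rw [if_neg hs]
        cases h : cd.get? (PySem.Str.len k) with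
        | none => simp only [PySem.Dict.get?_insert_of_ne _ _ (fun hc => hs hc.symm)]
        | some v =>
          simp only
          by_cases hv : v < f k
          · simp only [if_pos hv, PySem.Dict.get?_insert_of_ne _ _ (fun hc => hs hc.symm)]
          · simp only [if_neg hv]
    rw [List.foldl_cons, ih, hstep, List.filter_cons]
    by_cases hs : PySem.Str.len k = s
    · rw [if_pos hs, if_pos (by simpa [PySem.Str.len_eq] using hs)]
      simp
    · rw [if_neg hs, if_neg (by simpa [PySem.Str.len_eq] using hs)]

lemma pv_ansA_iff (gen : List String) (C : PySem.Dict Int Int)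
    (hC : C = pvC gen) (k : String) :
    (k ∈ (PySem.Set.ofList gen : List String).filter
      (fun combi => decide (C.getD (PySem.Str.len combi) 0 ≥ 2 ∧
        (PySem.Dict.counter gen).getD combi 0 = C.getD (PySem.Str.len combi) 0)))
    ↔ pvPA gen k := by
  rw [List.mem_filter, decide_eq_true_iff, PySem.Set.mem_ofList]
  rw [pvC] at hC
  constructor
  · rintro ⟨hkg, h2, heq⟩
    have hkS : k ∈ PySem.Set.ofList gen := (PySem.Set.mem_ofList _ _).mpr hkg
    have hCg : C.get? (PySem.Str.len k)
        = PySem.List.max? (((PySem.Set.ofList gen : List String).filter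
            (fun k' => PySem.Str.len k' == PySem.Str.len k)).map
            (fun k' => (PySem.Dict.counter gen).getD k' 0)) (fun v => v) := by
      rw [hC, pv_cnd_get?, PySem.Dict.get?_empty, pv_omax_fold_none]
    have hkf : k ∈ (PySem.Set.ofList gen : List String).filter
        (fun k' => PySem.Str.len k' == PySem.Str.len k) :=
      List.mem_filter.mpr ⟨hkS, by simp⟩
    obtain ⟨T, hT⟩ : ∃ T, C.get? (PySem.Str.len k) = some T := by
      rw [hCg]
      cases hm : PySem.List.max? _ (fun v : Int => v) with
      | some T => exact ⟨T, rfl⟩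
      | none =>
        rw [PySem.List.max?_eq_none_iff] at hm
        rw [List.map_eq_nil_iff] at hm
        rw [hm] at hkf
        simp at hkf
    have hgetD : C.getD (PySem.Str.len k) 0 = T := PySem.Dict.getD_of_get?_eq_some _ _ hT
    rw [hgetD] at h2 heq
    rw [hT] at hCg
    have hmax := PySem.List.max?_isMax hCg.symm
    refine ⟨hkg, ?_, ?_⟩
    · rw [PySem.Dict.getD_counter] at heq
      omega
    · intro k' hk' hlen
      have hk'm := List.mem_map_of_mem (f := fun k' => (PySem.Dict.counter gen).getD k' 0)
        ((List.mem_filter (p := fun k'' => PySem.Str.len k'' == PySem.Str.len k)).mpr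
          ⟨(PySem.Set.mem_ofList gen k').mpr hk', by rw [hlen]; simp⟩)
      have := hmax _ hk'm
      simp only [PySem.Dict.getD_counter] at this heq
      omega
  · rintro ⟨hkg, h2, hmaxP⟩
    have hkS : k ∈ PySem.Set.ofList gen := (PySem.Set.mem_ofList _ _).mpr hkg
    have hCg : C.get? (PySem.Str.len k)
        = PySem.List.max? (((PySem.Set.ofList gen : List String).filter
            (fun k' => PySem.Str.len k' == PySem.Str.len k)).map
            (fun k' => (PySem.Dict.counter gen).getD k' 0)) (fun v => v) := by
      rw [hC, pv_cnd_get?, PySem.Dict.get?_empty, pv_omax_fold_none]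
    have hkf : k ∈ (PySem.Set.ofList gen : List String).filter
        (fun k' => PySem.Str.len k' == PySem.Str.len k) :=
      List.mem_filter.mpr ⟨hkS, by simp⟩
    obtain ⟨T, hT⟩ : ∃ T, C.get? (PySem.Str.len k) = some T := by
      rw [hCg]
      cases hm : PySem.List.max? _ (fun v : Int => v) with
      | some T => exact ⟨T, rfl⟩
      | none =>
        rw [PySem.List.max?_eq_none_iff] at hm
        rw [List.map_eq_nil_iff] at hm
        rw [hm] at hkf
        simp at hkf
    have hgetD : C.getD (PySem.Str.len k) 0 = T := PySem.Dict.getD_of_get?_eq_some _ _ hT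
    rw [hT] at hCg
    have hmax := PySem.List.max?_isMax hCg.symm
    have hmemT := PySem.List.max?_mem hCg.symm
    obtain ⟨k1, hk1f, hk1⟩ := List.mem_map.mp hmemT
    obtain ⟨hk1S, hk1len⟩ := List.mem_filter.mp hk1f
    have hk1g : k1 ∈ gen := (PySem.Set.mem_ofList _ _).mp hk1S
    have hk1len' : PySem.Str.len k1 = PySem.Str.len k := by simpa using hk1len
    have hTle : T ≤ (gen.count k : Int) := by
      rw [← hk1, PySem.Dict.getD_counter]
      exact hmaxP k1 hk1g hk1len'
    have hkmem := List.mem_map_of_mem (f := fun k' => (PySem.Dict.counter gen).getD k' 0) hkf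
    have hcle := hmax _ hkmem
    simp only [PySem.Dict.getD_counter] at hcle
    have hTeq : ((gen.count k : Int)) = T := le_antisymm hcle hTle
    refine ⟨hkg, ?_, ?_⟩
    · rw [hgetD]; omega
    · rw [hgetD, PySem.Dict.getD_counter]; omega

lemma pv_solution_eq (orders : List String) (course : List Int) :
    solution orders course =
    PySem.List.sorted
      ((PySem.Set.ofList (pvGen (pvO orders) course) : List String).filter
        (fun combi => decide ((pvC (pvGen (pvO orders) course)).getD (PySem.Str.len combi) 0 ≥ 2 ∧
          (PySem.Dict.counter (pvGen (pvO orders) course)).getD combi 0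
            = (pvC (pvGen (pvO orders) course)).getD (PySem.Str.len combi) 0)))
      (fun x => x) false := by
  simp only [solution]
  unfold pvO pvC
  rw [pv_dictA_eq, PySem.Dict.keys_counter, PySem.List.foldl_append_ite_eq_filter, List.nil_append]

-- ===== B side =====
lemma pv_len_nonneg (s : String) : 0 ≤ PySem.Str.len s := by
  simp [PySem.Str.len_eq]

lemma pv_genB_eq (order : List Char) (need : Int) (h : 0 ≤ need) :
    genB order need = PySem.List.combinations order need.toNat := by
  induction order generalizing need with
  | nil =>
    rw [genB]
    by_cases h0 : need = 0
    · subst h0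
      simp [PySem.List.combinations_zero]
    · rw [if_neg h0, if_pos (by simp; omega)]
      obtain ⟨r, hr⟩ : ∃ r, need.toNat = r + 1 := ⟨need.toNat - 1, by omega⟩
      rw [hr, PySem.List.combinations_nil_succ]
  | cons f rest ih =>
    rw [genB]
    by_cases h0 : need = 0
    · subst h0
      simp [PySem.List.combinations_zero]
    · rw [if_neg h0]
      by_cases hlt : ((f :: rest).length : Int) < need
      · rw [if_pos hlt, Eq.comm, PySem.List.combinations_eq_nil_of_length_lt]
        simp at hlt ⊢
        omega
      · rw [if_neg hlt]
        obtain ⟨r, hr⟩ : ∃ r, need.toNat = r + 1 := ⟨need.toNat - 1, by omega⟩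
        rw [hr, PySem.List.combinations_cons_succ, ih (need - 1) (by omega), ih need h,
          show (need - 1).toNat = r by omega, hr]

def pvPool (O : List (List Char)) (course : List Int) : List String :=
  O.flatMap (fun order => course.flatMap (fun num => (genB order num).map (fun c => String.ofList c)))

lemma pv_pool_eq (O : List (List Char)) (course : List Int) :
    O.foldl (fun pool order =>
      course.foldl (fun pool num =>
        pool ++ (genB order num).map (fun c => String.ofList c)) pool) []
    = pvPool O course := by
  have hstep : (fun (pool : List String) (order : List Char) =>
      course.foldl (fun pool num =>
        pool ++ (genB order num).map (fun c => String.ofList c)) pool)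
      = fun pool order => pool ++ course.flatMap (fun num => (genB order num).map (fun c => String.ofList c)) := by
    funext pool order
    rw [PySem.List.foldl_append_eq_flatMap]
  rw [hstep, PySem.List.foldl_append_eq_flatMap, List.nil_append, pvPool]

lemma pv_pool_eq_gen (O : List (List Char)) (course : List Int)
    (hpre : ∀ num ∈ course, 0 ≤ num) : pvPool O course = pvGen O course := by
  unfold pvPool pvGen
  apply List.flatMap_congr
  intro order _
  apply List.flatMap_congr
  intro num hnum
  rw [pvCombos, pv_genB_eq order num (hpre num hnum)]

-- runsB on a ≤-sorted list: keys are the distinct elements in strictly increasing order,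
-- counts are multiplicities
-- in a ≤-sorted list every element surviving dropWhile (== x) is > x
lemma pv_drop_lt (x : String) : ∀ (xs : List String), xs.Pairwise (· ≤ ·) →
    (∀ y ∈ xs, x ≤ y) → ∀ z ∈ xs.dropWhile (· == x), x < z := by
  intro xs
  induction xs with
  | nil => intro _ _ z hz; simp at hz
  | cons y ys ih =>
    intro hp hle z hz
    by_cases hy : (y == x) = true
    · rw [List.dropWhile_cons, if_pos hy] at hz
      exact ih (List.Pairwise.of_cons hp) (fun y' hy' => hle y' (List.mem_cons_of_mem _ hy')) z hz
    · rw [List.dropWhile_cons, if_neg hy] at hz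
      have hxy : x < y := lt_of_le_of_ne (hle y List.mem_cons_self) (by
        intro hc
        exact hy (by simp [hc]))
      rcases List.mem_cons.mp hz with rfl | hz'
      · exact hxy
      · exact lt_of_lt_of_le hxy ((List.pairwise_cons.mp hp).1 z hz')

lemma pv_runsB_sound (l : List String) (hs : l.Pairwise (· ≤ ·)) :
    (∀ p ∈ runsB l, p.1 ∈ l ∧ p.2 = (l.count p.1 : Int)) ∧
    (∀ k ∈ l, k ∈ (runsB l).map Prod.fst) ∧
    ((runsB l).map Prod.fst).Pairwise (· < ·) := by
  induction l using runsB.induct with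
  | case1 => simp [runsB]
  | case2 x xs ih =>
    have hxs : xs.Pairwise (· ≤ ·) := List.Pairwise.of_cons hs
    have hxle : ∀ y ∈ xs, x ≤ y := (List.pairwise_cons.mp hs).1
    have hd : (xs.dropWhile (· == x)).Pairwise (· ≤ ·) :=
      hxs.sublist (List.dropWhile_sublist _)
    have hdlt : ∀ z ∈ xs.dropWhile (· == x), x < z := pv_drop_lt x xs hxs hxle
    have hteq : ∀ y ∈ xs.takeWhile (· == x), y = x := by
      intro y hy
      have := List.mem_takeWhile_imp hy
      simpa using this
    have hsplit : xs.takeWhile (· == x) ++ xs.dropWhile (· == x) = xs :=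
      List.takeWhile_append_dropWhile
    obtain ⟨ih1, ih2, ih3⟩ := ih hd
    have htcx : (xs.takeWhile (· == x)).count x = (xs.takeWhile (· == x)).length :=
      List.count_eq_length.mpr (fun y hy => by rw [hteq y hy])
    have hdcx : (xs.dropWhile (· == x)).count x = 0 :=
      List.count_eq_zero.mpr (fun hmem => lt_irrefl x (hdlt x hmem))
    have hxscount : xs.count x = (xs.takeWhile (· == x)).length := by
      conv_lhs => rw [← hsplit]
      rw [List.count_append, htcx, hdcx]
      omega
    rw [runsB]
    refine ⟨?_, ?_, ?_⟩
    · intro p hp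
      rcases List.mem_cons.mp hp with rfl | hp'
      · refine ⟨List.mem_cons_self, ?_⟩
        simp only [List.count_cons_self, hxscount]
        push_cast
        ring
      · obtain ⟨hmem, hcnt⟩ := ih1 p hp'
        have hplt : x < p.1 := hdlt p.1 hmem
        have hxsmem : p.1 ∈ xs := (List.dropWhile_sublist _).subset hmem
        refine ⟨List.mem_cons_of_mem _ hxsmem, ?_⟩
        rw [hcnt]
        congr 1
        have ht0 : (xs.takeWhile (· == x)).count p.1 = 0 :=
          List.count_eq_zero.mpr (fun hmem' => absurd (hteq _ hmem') (ne_of_gt hplt))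
        have hb : (x == p.1) = false := beq_eq_false_iff_ne.mpr (ne_of_lt hplt)
        rw [List.count_cons, hb]
        conv_rhs => rw [← hsplit]
        rw [List.count_append, ht0]
        simp
    · intro k hk
      rcases List.mem_cons.mp hk with rfl | hk'
      · simp
      · rw [← hsplit] at hk'
        rcases List.mem_append.mp hk' with ht | hdm
        · rw [hteq k ht]; simp
        · exact List.mem_cons_of_mem _ (ih2 k hdm)
    · rw [List.map_cons, List.pairwise_cons]
      refine ⟨?_, ih3⟩
      intro b hb
      obtain ⟨p, hp, rfl⟩ := List.mem_map.mp hb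
      exact hdlt p.1 (ih1 p hp).1

-- the best array: its entry at L is the running max of the counts of the keys of length L
lemma pv_best_getD (runs : List (String × Int)) (best : List Int)
    (hrng : ∀ p ∈ runs, (PySem.Str.len p.1).toNat < best.length) (L : Nat) (hL : L < best.length) :
    (runs.foldl (fun (best : List Int) p =>
        if best.getD (PySem.Str.len p.1).toNat 0 < p.2
        then best.set (PySem.Str.len p.1).toNat p.2 else best) best).getD L 0
    = ((runs.filter (fun p => (PySem.Str.len p.1).toNat == L)).map Prod.snd).foldl max
        (best.getD L 0) := by
  induction runs generalizing best with
  | nil => simp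
  | cons p rest ih =>
    have hp : (PySem.Str.len p.1).toNat < best.length := hrng p List.mem_cons_self
    have hgd : ∀ (b : List Int), b = (if best.getD (PySem.Str.len p.1).toNat 0 < p.2
          then best.set (PySem.Str.len p.1).toNat p.2 else best) →
        b.length = best.length ∧
        b.getD L 0 = (if (PySem.Str.len p.1).toNat = L
          then max (best.getD L 0) p.2 else best.getD L 0) := by
      intro b hb
      by_cases hc : best.getD (PySem.Str.len p.1).toNat 0 < p.2
      · rw [if_pos hc] at hb
        subst hb
        refine ⟨List.length_set .., ?_⟩
        by_cases hL : (PySem.Str.len p.1).toNat = L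
        · subst hL
          rw [if_pos rfl]
          simp only [List.getD_eq_getElem?_getD] at hc ⊢
          rw [List.getElem?_set, if_pos rfl, if_pos hp]
          simp only [Option.getD_some]
          omega
        · rw [if_neg hL]
          simp only [List.getD_eq_getElem?_getD]
          rw [List.getElem?_set, if_neg hL]
      · rw [if_neg hc] at hb
        subst hb
        refine ⟨rfl, ?_⟩
        by_cases hL : (PySem.Str.len p.1).toNat = L
        · rw [if_pos hL, ← hL]
          omega
        · rw [if_neg hL]
    rw [List.foldl_cons, List.filter_cons]
    set b := (if best.getD (PySem.Str.len p.1).toNat 0 < p.2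
        then best.set (PySem.Str.len p.1).toNat p.2 else best) with hbdef
    obtain ⟨hlen', hgd'⟩ := hgd b hbdef
    rw [ih b (fun q hq => by rw [hlen']; exact hrng q (List.mem_cons_of_mem _ hq)) (by omega), hgd']
    by_cases hL : (PySem.Str.len p.1).toNat = L
    · rw [if_pos hL, if_pos (by simpa using hL), List.map_cons, List.foldl_cons]
    · rw [if_neg hL, if_neg (by simpa using hL)]

lemma pv_le_foldl_max (l : List Int) (a : Int) : a ≤ l.foldl max a := by
  induction l generalizing a with
  | nil => simp
  | cons x t ih => exact le_trans (le_max_left a x) (ih (max a x))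

lemma pv_mem_le_foldl_max (l : List Int) (a x : Int) (hx : x ∈ l) : x ≤ l.foldl max a := by
  induction l generalizing a with
  | nil => simp at hx
  | cons y t ih =>
    rcases List.mem_cons.mp hx with rfl | hx'
    · exact le_trans (le_max_right a x) (pv_le_foldl_max t (max a x))
    · exact ih (max a y) hx'

lemma pv_foldl_max_mem (l : List Int) (a : Int) : l.foldl max a = a ∨ l.foldl max a ∈ l := by
  induction l generalizing a with
  | nil => simp
  | cons y t ih =>
    rcases ih (max a y) with h | h
    · rcases max_choice a y with hm | hm
      · left; rw [List.foldl_cons, h, hm]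
      · right; rw [List.foldl_cons, h, hm]; exact List.mem_cons_self
    · right; exact List.mem_cons_of_mem _ h

lemma pv_maxlen_ge (runs : List (String × Int)) :
    ∀ p ∈ runs, PySem.Str.len p.1
      ≤ runs.foldl (fun m p => if m < PySem.Str.len p.1 then PySem.Str.len p.1 else m) 0 := by
  have hmax : (fun (m : Int) (p : String × Int) =>
      if m < PySem.Str.len p.1 then PySem.Str.len p.1 else m)
      = fun m p => max m (PySem.Str.len p.1) := by
    funext m p
    omega
  rw [hmax, ← List.foldl_map (f := fun p : String × Int => PySem.Str.len p.1) (g := max)]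
  intro p hp
  exact pv_mem_le_foldl_max _ _ _ (List.mem_map_of_mem hp)

lemma pv_maxlen_nonneg (runs : List (String × Int)) :
    0 ≤ runs.foldl (fun m p => if m < PySem.Str.len p.1 then PySem.Str.len p.1 else m) 0 := by
  have hmax : (fun (m : Int) (p : String × Int) =>
      if m < PySem.Str.len p.1 then PySem.Str.len p.1 else m)
      = fun m p => max m (PySem.Str.len p.1) := by
    funext m p
    omega
  rw [hmax, ← List.foldl_map (f := fun p : String × Int => PySem.Str.len p.1) (g := max)]
  exact pv_le_foldl_max _ _

def pvRuns (gen : List String) : List (String × Int) :=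
  runsB (PySem.List.sorted gen (fun x => x) false)

def pvMaxlen (runs : List (String × Int)) : Int :=
  runs.foldl (fun m p => if m < PySem.Str.len p.1 then PySem.Str.len p.1 else m) 0

def pvBestArr (runs : List (String × Int)) : List Int :=
  runs.foldl (fun (best : List Int) p =>
    if best.getD (PySem.Str.len p.1).toNat 0 < p.2
    then best.set (PySem.Str.len p.1).toNat p.2 else best)
    (List.replicate (pvMaxlen runs + 1).toNat (0 : Int))

def pvCore (gen : List String) : List String :=
  ((pvRuns gen).filter (fun p =>
    2 ≤ p.2 && p.2 == (pvBestArr (pvRuns gen)).getD (PySem.Str.len p.1).toNat 0)).map (·.1)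

lemma pv_solution_alt_eq (orders : List String) (course : List Int) :
    solution_alt orders course = pvCore (pvPool (pvO orders) course) := by
  simp only [solution_alt, pvCore, pvRuns, pvBestArr, pvMaxlen, pvO]
  rw [pv_pool_eq]

lemma pv_core_spec (gen : List String) :
    (pvCore gen).Pairwise (· < ·) ∧ (∀ k, k ∈ pvCore gen ↔ pvPA gen k) := by
  have hperm : (PySem.List.sorted gen (fun x => x) false).Perm gen := PySem.List.sorted_perm ..
  have hpw : (PySem.List.sorted gen (fun x => x) false).Pairwise (· ≤ ·) :=
    PySem.List.sorted_pairwise ..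
  obtain ⟨hr1, hr2, hr3⟩ := pv_runsB_sound _ hpw
  have hml := pv_maxlen_ge (pvRuns gen)
  have hml0 := pv_maxlen_nonneg (pvRuns gen)
  have hrng : ∀ p ∈ pvRuns gen,
      (PySem.Str.len p.1).toNat < (List.replicate (pvMaxlen (pvRuns gen) + 1).toNat (0 : Int)).length := by
    intro p hp
    have h1 := hml p hp
    have h2 := pv_len_nonneg p.1
    rw [List.length_replicate]
    simp only [pvMaxlen] at h1 ⊢
    omega
  have hbest : ∀ (L : Nat), L < (pvMaxlen (pvRuns gen) + 1).toNat →
      (pvBestArr (pvRuns gen)).getD L 0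
        = (((pvRuns gen).filter (fun p => (PySem.Str.len p.1).toNat == L)).map Prod.snd).foldl max 0 := by
    intro L hL
    rw [pvBestArr, pv_best_getD _ _ hrng L (by rw [List.length_replicate]; exact hL)]
    congr 1
    simp only [List.getD_eq_getElem?_getD, List.getElem?_replicate]
    split <;> simp
  have hLk : ∀ p ∈ pvRuns gen, (PySem.Str.len p.1).toNat < (pvMaxlen (pvRuns gen) + 1).toNat := by
    intro p hp
    have h1 := hml p hp
    have h2 := pv_len_nonneg p.1
    simp only [pvMaxlen] at h1 ⊢
    omega
  constructor
  · rw [pvCore]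
    exact hr3.sublist (List.Sublist.map Prod.fst List.filter_sublist)
  · intro k
    rw [pvCore, List.mem_map]
    constructor
    · rintro ⟨p, hpf, rfl⟩
      obtain ⟨hp, hcond⟩ := List.mem_filter.mp hpf
      simp only [Bool.and_eq_true, decide_eq_true_iff, beq_iff_eq] at hcond
      obtain ⟨h2, hM⟩ := hcond
      obtain ⟨hmem, hcnt⟩ := hr1 p hp
      have hkg : p.1 ∈ gen := hperm.mem_iff.mp hmem
      have hcg : p.2 = (gen.count p.1 : Int) := by rw [hcnt, hperm.count_eq]
      refine ⟨hkg, by omega, ?_⟩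
      intro k' hk' hlen
      have hk'l : k' ∈ PySem.List.sorted gen (fun x => x) false := hperm.mem_iff.mpr hk'
      obtain ⟨q, hq, hq1⟩ := List.mem_map.mp (hr2 k' hk'l)
      have hqf : q ∈ (pvRuns gen).filter (fun p' => (PySem.Str.len p'.1).toNat == (PySem.Str.len p.1).toNat) := by
        apply List.mem_filter.mpr
        refine ⟨hq, ?_⟩
        rw [hq1, hlen]
        simp
      have hqle : q.2 ≤ (pvBestArr (pvRuns gen)).getD (PySem.Str.len p.1).toNat 0 := by
        rw [hbest _ (hLk p hp)]
        exact pv_mem_le_foldl_max _ _ _ (List.mem_map_of_mem hqf)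
      have hqc : q.2 = (gen.count k' : Int) := by
        rw [(hr1 q hq).2, hq1, hperm.count_eq]
      omega
    · rintro ⟨hkg, h2, hmaxP⟩
      have hkl : k ∈ PySem.List.sorted gen (fun x => x) false := hperm.mem_iff.mpr hkg
      obtain ⟨q, hq, hq1⟩ := List.mem_map.mp (hr2 k hkl)
      have hqc : q.2 = (gen.count k : Int) := by
        rw [(hr1 q hq).2, hq1, hperm.count_eq]
      have hqle : q.2 ≤ (pvBestArr (pvRuns gen)).getD (PySem.Str.len q.1).toNat 0 := by
        rw [hbest _ (hLk q hq)]
        apply pv_mem_le_foldl_max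
        apply List.mem_map_of_mem
        exact List.mem_filter.mpr ⟨hq, by simp⟩
      have hMle : (pvBestArr (pvRuns gen)).getD (PySem.Str.len q.1).toNat 0 ≤ q.2 := by
        rw [hbest _ (hLk q hq)]
        rcases pv_foldl_max_mem ((((pvRuns gen).filter
            (fun p => (PySem.Str.len p.1).toNat == (PySem.Str.len q.1).toNat)).map Prod.snd)) 0 with h | h
        · rw [h]
          omega
        · obtain ⟨r, hrf, hr2'⟩ := List.mem_map.mp h
          obtain ⟨hrm, hrl⟩ := List.mem_filter.mp hrf
          have hrlen : PySem.Str.len r.1 = PySem.Str.len k := by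
            have h1 := pv_len_nonneg r.1
            have h2' := pv_len_nonneg k
            simp only [beq_iff_eq] at hrl
            rw [hq1] at hrl
            omega
          have hrg : r.1 ∈ gen := hperm.mem_iff.mp (hr1 r hrm).1
          have hrc : r.2 = (gen.count r.1 : Int) := by rw [(hr1 r hrm).2, hperm.count_eq]
          have := hmaxP r.1 hrg hrlen
          rw [← hr2']
          omega
      refine ⟨q, List.mem_filter.mpr ⟨hq, ?_⟩, hq1⟩
      simp only [Bool.and_eq_true, decide_eq_true_iff, beq_iff_eq]
      omega

lemma pv_solution_alt_spec (orders : List String) (course : List Int)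
    (hpre : ∀ num ∈ course, 0 ≤ num) :
    (solution_alt orders course).Pairwise (· < ·) ∧
    (∀ k, k ∈ solution_alt orders course ↔ pvPA (pvGen (pvO orders) course) k) := by
  rw [pv_solution_alt_eq, pv_pool_eq_gen _ _ hpre]
  exact pv_core_spec _

-- ===== VERDICT (by name: the statement is the Claim_ definition above) =====
theorem solution_spec : Claim_equal_solution := by
  intro orders course hdom hpre
  unfold Spec_solution
  rcases hpre with hord | hpre
  · subst hord
    have h0 : PySem.List.sorted ([] : List String) (fun x => x) false = [] := rfl
    simp [solution, solution_alt, h0, runsB]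
  obtain ⟨hBlt, hBmem⟩ := pv_solution_alt_spec orders course hpre
  rw [pv_solution_eq]
  apply PySem.List.sorted_eq_of_perm_of_pairwise_lt
  · apply (List.perm_ext_iff_of_nodup
      (hBlt.imp ne_of_lt) (List.Nodup.filter _ (PySem.Set.nodup_ofList _))).mpr
    intro k
    rw [hBmem k, pv_ansA_iff (pvGen (pvO orders) course) _ rfl k]
  · exact hBlt
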